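-- pv_equiv track=rewrite | github.com/Adisha2/45-Days-Code | Day 1-EZSPEAK.py | is_easy_to_pronounce
-- ===== SOURCE A (Python) =====
-- def is_easy_to_pronounce(s):
--     vowels = {'a', 'e', 'i', 'o', 'u'}
--     max_consonants = 0
--     current_consonants = 0
--
--     for char in s:
--         if char not in vowels:
--             current_consonants += 1
--             if current_consonants >= 4:
--                 return "NO"
--         else:
--             current_consonants = 0
--
--     return "YES"
-- ===== SOURCE B (Python) =====
-- def is_easy_to_pronounce(s):
--     vowels = "aeiou"
--     if any(all(c not in vowels for c in s[i:i + 4]) for i in range(len(s) - 3)):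
--         return "NO"
--     return "YES"
-- ===== Notes on version B (the rewrite author's own statement) =====
-- stated objective: idiomatic
-- what changed: Replaces the running consecutive-consonant counter with reset and early return by a sliding-window scan: any()/all() over every 4-character window of the string.
import Mathlib
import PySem

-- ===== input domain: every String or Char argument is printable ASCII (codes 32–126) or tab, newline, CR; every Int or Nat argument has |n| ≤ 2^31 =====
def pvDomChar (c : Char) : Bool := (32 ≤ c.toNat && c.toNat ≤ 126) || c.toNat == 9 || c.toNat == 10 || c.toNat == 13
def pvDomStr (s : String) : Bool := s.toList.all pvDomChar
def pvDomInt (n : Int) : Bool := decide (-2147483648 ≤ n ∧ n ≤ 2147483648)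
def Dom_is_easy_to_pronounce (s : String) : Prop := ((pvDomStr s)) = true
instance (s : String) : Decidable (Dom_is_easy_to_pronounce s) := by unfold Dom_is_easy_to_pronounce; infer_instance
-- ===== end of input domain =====

-- B replaces A's running consonant counter by a sliding-window scan over all 4-char windows (idiomatic).

-- ===== PORT A =====
def pvIsVowel (c : Char) : Bool := c = 'a' || c = 'e' || c = 'i' || c = 'o' || c = 'u'

-- the for-loop of A: state = current_consonants, early return "NO"
def pvGoA : List Char → Nat → String
  | [], _ => "YES"
  | ch :: rest, cur =>
      if !pvIsVowel ch then
        if cur + 1 ≥ 4 then "NO" else pvGoA rest (cur + 1)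
      else pvGoA rest 0

def is_easy_to_pronounce (s : String) : String := pvGoA s.toList 0

-- ===== PORT B =====
-- all(c not in vowels for c in s[i:i+4]): the 4-char window starting here is all consonants
def pvWin4 : List Char → Bool
  | a :: b :: c :: d :: _ => !pvIsVowel a && !pvIsVowel b && !pvIsVowel c && !pvIsVowel d
  | _ => false

-- any(... for i in range(len(s)-3)): try the window at each position, shifting by one
def pvAnyWin : List Char → Bool
  | [] => false
  | x :: t => pvWin4 (x :: t) || pvAnyWin t

def is_easy_to_pronounce_alt (s : String) : String :=
  if pvAnyWin s.toList then "NO" else "YES"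

-- ===== PRECONDITION & SPEC =====
def Spec_is_easy_to_pronounce (s : String) (out : String) : Prop := out = is_easy_to_pronounce_alt s
instance (s : String) (out : String) : Decidable (Spec_is_easy_to_pronounce s out) := by unfold Spec_is_easy_to_pronounce; infer_instance

-- ===== CLAIM (what is proved, stated in full; the proofs are below) =====
def Claim_equal_is_easy_to_pronounce : Prop := ∀ (s : String), Dom_is_easy_to_pronounce s → Spec_is_easy_to_pronounce s (is_easy_to_pronounce s)

-- ===== LEMMAS AND PROOFS =====

-- a consonant prefix of length k
def pvConsPre : Nat → List Char → Bool
  | 0, _ => true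
  | _ + 1, [] => false
  | k + 1, x :: t => !pvIsVowel x && pvConsPre k t

lemma pvConsPre_mono : ∀ (j k : Nat) (l : List Char), j ≤ k → pvConsPre k l = true → pvConsPre j l = true := by
  intro j k
  induction k generalizing j with
  | zero => intro l hj _; interval_cases j; rfl
  | succ k ih =>
    intro l hj hk
    cases j with
    | zero => rfl
    | succ j =>
      cases l with
      | nil => simp [pvConsPre] at hk
      | cons x t =>
        simp [pvConsPre] at hk ⊢
        exact ⟨hk.1, ih j t (Nat.succ_le_succ_iff.mp hj) hk.2⟩

lemma pvWin4_eq_consPre (l : List Char) : pvWin4 l = pvConsPre 4 l := by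
  match l with
  | [] => rfl
  | [a] => simp [pvWin4, pvConsPre]
  | [a, b] => simp [pvWin4, pvConsPre]
  | [a, b, c] => simp [pvWin4, pvConsPre]
  | a :: b :: c :: d :: t => simp [pvWin4, pvConsPre, Bool.and_assoc]

lemma pvConsPre4_anyWin (l : List Char) (h : pvConsPre 4 l = true) : pvAnyWin l = true := by
  cases l with
  | nil => simp [pvConsPre] at h
  | cons x t => simp [pvAnyWin, pvWin4_eq_consPre, h]

lemma pvGoA_char (l : List Char) : ∀ (c : Nat), c ≤ 3 →
    pvGoA l c = if pvConsPre (4 - c) l || pvAnyWin l then "NO" else "YES" := by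
  induction l with
  | nil =>
    intro c hc
    have h4 : 4 - c = (3 - c) + 1 := by omega
    simp [pvGoA, pvAnyWin, h4, pvConsPre]
  | cons x t ih =>
    intro c hc
    have h4 : 4 - c = (3 - c) + 1 := by omega
    by_cases hv : pvIsVowel x = true
    · -- vowel: counter resets
      have hP : pvConsPre (4 - c) (x :: t) = false := by
        simp [h4, pvConsPre, hv]
      have hW : pvWin4 (x :: t) = false := by
        rw [pvWin4_eq_consPre]; simp [pvConsPre, hv]
      rw [show pvGoA (x :: t) c = pvGoA t 0 by simp [pvGoA, hv]]
      rw [ih 0 (by omega)]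
      simp only [pvAnyWin, hP, hW, Bool.false_or]
      cases hQ : pvConsPre 4 t
      · simp
      · simp [pvConsPre4_anyWin t hQ]
    · -- consonant
      rcases Nat.lt_or_ge c 3 with hlt | hge
      · -- c < 3: loop continues with c+1
        rw [show pvGoA (x :: t) c = pvGoA t (c + 1) by
              simp [pvGoA, hv]; omega]
        rw [ih (c + 1) (by omega)]
        have h41 : 4 - (c + 1) = 3 - c := by omega
        have hP : pvConsPre (4 - c) (x :: t) = pvConsPre (3 - c) t := by
          simp [h4, pvConsPre, hv]
        have hW : pvWin4 (x :: t) = pvConsPre 3 t := by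
          rw [pvWin4_eq_consPre]
          simp [pvConsPre, hv]
        simp only [pvAnyWin, hP, hW, h41]
        cases hQ : pvConsPre 3 t
        · simp
        · have := pvConsPre_mono (3 - c) 3 t (by omega) hQ
          simp [this]
      · -- c = 3: early return "NO"
        have hc3 : c = 3 := by omega
        subst hc3
        have hP : pvConsPre (4 - 3) (x :: t) = true := by
          simp [pvConsPre, hv]
        simp [pvGoA, hv, hP]

-- ===== VERDICT (by name: the statement is the Claim_ definition above) =====
theorem is_easy_to_pronounce_spec : Claim_equal_is_easy_to_pronounce := by
  intro s _
  unfold Spec_is_easy_to_pronounce is_easy_to_pronounce is_easy_to_pronounce_alt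
  have h := pvGoA_char s.toList 0 (by omega)
  rw [h]
  cases hA : pvAnyWin s.toList with
  | true => simp
  | false =>
    simp only [Bool.or_false]
    have : pvConsPre 4 s.toList = false := by
      cases hP : pvConsPre 4 s.toList
      · rfl
      · exact absurd (pvConsPre4_anyWin _ hP) (by simp [hA])
    simp [this]
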